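-- pv_equiv track=rewrite | github.com/san9nelox/Hitori | user_solution/check_solution.py | check_black_neigh
-- ===== SOURCE A (Python) =====
-- def check_black_neigh(board_colors):
--     for i in range(len(board_colors)):
--         for j in range(len(board_colors[i])):
--             if board_colors[i][j] == 'b':
--                 if i > 0:
--                     if board_colors[i - 1][j] == 'b':
--                         return False
--                 if i < len(board_colors) - 1:
--                     if board_colors[i + 1][j] == 'b':
--                         return False
--                 if j > 0:
--                     if board_colors[i][j - 1] == 'b':
--                         return False
--                 if j < len(board_colors[i]) - 1:
--                     if board_colors[i][j + 1] == 'b':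
--                         return False
--     return True
-- ===== SOURCE B (Python) =====
-- def check_black_neigh(board_colors):
--     # Two passes over adjacent pairs: horizontal pairs within each row,
--     # then vertical pairs between consecutive rows (zip guards by the shorter row).
--     for row in board_colors:
--         for a, b in zip(row, row[1:]):
--             if a == 'b' and b == 'b':
--                 return False
--     for r1, r2 in zip(board_colors, board_colors[1:]):
--         for a, b in zip(r1, r2):
--             if a == 'b' and b == 'b':
--                 return False
--     return True
-- ===== Notes on version B (the rewrite author's own statement) =====
-- stated objective: simpler
-- what changed: Instead of A's per-cell inspection of all four neighbours (each adjacency examined from both endpoints, with index arithmetic and four bound checks), B makes two pair passes: zip each row with its tail for horizontal pairs, and zip consecutive rows for vertical pairs, so each adjacency is inspected exactly once with no index arithmetic.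
import Mathlib
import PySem

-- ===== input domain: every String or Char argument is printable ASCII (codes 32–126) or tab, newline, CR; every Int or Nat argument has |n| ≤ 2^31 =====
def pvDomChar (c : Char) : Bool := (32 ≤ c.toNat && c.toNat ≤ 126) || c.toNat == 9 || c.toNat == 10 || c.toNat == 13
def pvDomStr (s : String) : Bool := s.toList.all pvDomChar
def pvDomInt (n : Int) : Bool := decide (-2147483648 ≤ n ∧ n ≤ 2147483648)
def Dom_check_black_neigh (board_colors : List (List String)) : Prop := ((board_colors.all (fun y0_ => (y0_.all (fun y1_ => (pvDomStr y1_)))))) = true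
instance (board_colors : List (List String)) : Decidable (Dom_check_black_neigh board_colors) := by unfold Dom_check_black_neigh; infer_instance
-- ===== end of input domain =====

-- B checks each adjacency exactly once via two pair passes (zip each row with its tail, zip
-- consecutive rows) instead of A's per-cell four-neighbour inspection; objective: simpler.

-- ===== PORT A =====
-- literal transliteration: the two nested for-loops with early `return False` become nested `all`
-- over pyRange (an early False and a failing `all` give the same Bool); every subscript is pyGetD
-- (out-of-range reads, where Python raises IndexError, are excluded by Pre_ below).
def check_black_neigh (board_colors : List (List String)) : Bool :=
  (PySem.List.pyRange 0 (board_colors.length : Int) 1).all (fun i =>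
    (PySem.List.pyRange 0 ((PySem.List.pyGetD board_colors i []).length : Int) 1).all (fun j =>
      if PySem.List.pyGetD (PySem.List.pyGetD board_colors i []) j "" == "b" then
        (if 0 < i then
          !(PySem.List.pyGetD (PySem.List.pyGetD board_colors (i-1) []) j "" == "b") else true) &&
        (if i < (board_colors.length : Int) - 1 then
          !(PySem.List.pyGetD (PySem.List.pyGetD board_colors (i+1) []) j "" == "b") else true) &&
        (if 0 < j then
          !(PySem.List.pyGetD (PySem.List.pyGetD board_colors i []) (j-1) "" == "b") else true) &&
        (if j < ((PySem.List.pyGetD board_colors i []).length : Int) - 1 then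
          !(PySem.List.pyGetD (PySem.List.pyGetD board_colors i []) (j+1) "" == "b") else true)
      else true))

-- ===== PORT B =====
def pvPairOK (p : String × String) : Bool := !(p.1 == "b" && p.2 == "b")

-- Source B's two pair passes; `xs[1:]` is `xs.tail` (exact for every list), `zip` is `List.zip`.
def check_black_neigh_alt (board_colors : List (List String)) : Bool :=
  (board_colors.all (fun row => (row.zip row.tail).all pvPairOK)) &&
  ((board_colors.zip board_colors.tail).all (fun rp => (rp.1.zip rp.2).all pvPairOK))

-- ===== PRECONDITION & SPEC =====
-- A scans cells row-major and, at each black cell, checks up, down, left, right in that order; the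
-- two vertical checks read board_colors[i-1][j] / board_colors[i+1][j] unguarded and raise
-- IndexError when that row is shorter than j+1, UNLESS an earlier check in this scan order already
-- found an adjacent black pair and returned False. Pre_ is exactly "A returns": every potential
-- out-of-range vertical access (pvCrashA) is preceded, in A's scan order (i, j, check 0..3), by
-- some successful adjacency detection (pvDetA).

-- black cell (i, j) whose k-th check (0 = up, 1 = down) reads out of range: an IndexError site of A
abbrev pvCrashA (bc : List (List String)) (i j k : Nat) : Prop :=
  j < (bc.getD i []).length ∧ (bc.getD i []).getD j "" = "b" ∧
  ((k = 0 ∧ 0 < i ∧ (bc.getD (i-1) []).length ≤ j) ∨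
   (k = 1 ∧ i + 1 < bc.length ∧ (bc.getD (i+1) []).length ≤ j))

-- black cell (i, j) whose k-th check (0 up, 1 down, 2 left, 3 right) finds a black neighbour
abbrev pvDetA (bc : List (List String)) (i j k : Nat) : Prop :=
  j < (bc.getD i []).length ∧ (bc.getD i []).getD j "" = "b" ∧
  ((k = 0 ∧ 0 < i ∧ j < (bc.getD (i-1) []).length ∧ (bc.getD (i-1) []).getD j "" = "b") ∨
   (k = 1 ∧ i + 1 < bc.length ∧ j < (bc.getD (i+1) []).length ∧ (bc.getD (i+1) []).getD j "" = "b") ∨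
   (k = 2 ∧ 0 < j ∧ (bc.getD i []).getD (j-1) "" = "b") ∨
   (k = 3 ∧ j + 1 < (bc.getD i []).length ∧ (bc.getD i []).getD (j+1) "" = "b"))

def Pre_check_black_neigh (board_colors : List (List String)) : Prop :=
  ((List.range board_colors.length).all (fun i =>
    (List.range (board_colors.getD i []).length).all (fun j =>
      (List.range 2).all (fun k =>
        !(decide (pvCrashA board_colors i j k)) ||
        ((List.range board_colors.length).any (fun i' =>
          (List.range (board_colors.getD i' []).length).any (fun j' =>
            (List.range 4).any (fun k' =>
              decide (pvDetA board_colors i' j' k') &&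
              decide (i' < i ∨ (i' = i ∧ (j' < j ∨ (j' = j ∧ k' < k)))))))))))) = true

instance (board_colors : List (List String)) : Decidable (Pre_check_black_neigh board_colors) := by
  unfold Pre_check_black_neigh; infer_instance

def pvWitness_check_black_neigh : List (List String) := [["b","w"],["w","b"]]

def Spec_check_black_neigh (board_colors : List (List String)) (out : Bool) : Prop := out = check_black_neigh_alt board_colors
instance (board_colors : List (List String)) (out : Bool) : Decidable (Spec_check_black_neigh board_colors out) := by unfold Spec_check_black_neigh; infer_instance

-- ===== CLAIM (what is proved, stated in full; the proofs are below) =====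
def Claim_equal_check_black_neigh : Prop := ∀ (board_colors : List (List String)), Dom_check_black_neigh board_colors → Pre_check_black_neigh board_colors → Spec_check_black_neigh board_colors (check_black_neigh board_colors)

-- ===== LEMMAS AND PROOFS =====

-- the cell (i, j); out-of-range reads give "" (never "b")
def pvCell (bc : List (List String)) (i j : Nat) : String := (bc.getD i []).getD j ""

-- "some horizontal adjacent pair of black cells"
def pvHP (bc : List (List String)) : Prop :=
  ∃ i j, j + 1 < (bc.getD i []).length ∧ pvCell bc i j = "b" ∧ pvCell bc i (j+1) = "b"

-- "some vertical adjacent pair of black cells (both columns in range)"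
def pvVP (bc : List (List String)) : Prop :=
  ∃ i j, i + 1 < bc.length ∧ j < (bc.getD i []).length ∧ j < (bc.getD (i+1) []).length ∧
    pvCell bc i j = "b" ∧ pvCell bc (i+1) j = "b"

lemma pv_getD_b_lt {l : List String} {j : Nat} (h : l.getD j "" = "b") : j < l.length := by
  by_contra hc
  rw [List.getD_eq_default _ _ (Nat.le_of_not_lt hc)] at h
  exact absurd h (by decide)

lemma pv_zip_all {α β : Type} (l1 : List α) (l2 : List β) (p : α × β → Bool) :
    (l1.zip l2).all p = true ↔
      ∀ k (h1 : k < l1.length) (h2 : k < l2.length), p (l1[k], l2[k]) = true := by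
  rw [List.all_eq_true]
  constructor
  · intro h k h1 h2
    rw [← List.getElem_zip (h := by simp; omega)]
    exact h _ (List.getElem_mem _)
  · intro h x hx
    obtain ⟨k, hk, rfl⟩ := List.mem_iff_getElem.mp hx
    rw [List.getElem_zip]
    exact h k (by simp at hk; omega) (by simp at hk; omega)

lemma pv_cell_eq (bc : List (List String)) (i j : Nat) (hi : i < bc.length)
    (hj : j < (bc[i]'hi).length) : pvCell bc i j = (bc[i]'hi)[j]'hj := by
  simp [pvCell, List.getD_eq_getElem?_getD, hi, hj]

lemma pv_alt_true_iff (bc : List (List String)) :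
    check_black_neigh_alt bc = true ↔ (¬ pvHP bc ∧ ¬ pvVP bc) := by
  unfold check_black_neigh_alt
  rw [Bool.and_eq_true, List.all_eq_true, pv_zip_all]
  constructor
  · rintro ⟨hH, hV⟩
    constructor
    · rintro ⟨i, j, hj, hb1, hb2⟩
      have hi : i < bc.length := by
        by_contra hc
        rw [List.getD_eq_default _ _ (Nat.le_of_not_lt hc)] at hj
        simp at hj
      have hrow : bc[i] ∈ bc := List.getElem_mem hi
      have hlen : (bc.getD i []).length = bc[i].length := by
        rw [List.getD_eq_getElem _ _ hi]
      have := (pv_zip_all bc[i] bc[i].tail pvPairOK).mp (hH _ hrow) j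
        (by omega) (by simp; omega)
      rw [List.getElem_tail] at this
      rw [pv_cell_eq bc i j hi (by omega)] at hb1
      rw [pv_cell_eq bc i (j+1) hi (by omega)] at hb2
      simp [pvPairOK, hb1, hb2] at this
    · rintro ⟨i, j, hi1, hj1, hj2, hb1, hb2⟩
      have h1 : i < bc.length := by omega
      have hl1 : (bc.getD i []).length = bc[i].length := by rw [List.getD_eq_getElem _ _ h1]
      have hl2 : (bc.getD (i+1) []).length = bc[i+1].length := by rw [List.getD_eq_getElem _ _ hi1]
      have hmem := hV i (by omega) (by simp; omega)
      rw [List.getElem_tail] at hmem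
      have := (pv_zip_all bc[i] bc[i+1] pvPairOK).mp hmem j (by omega) (by omega)
      rw [pv_cell_eq bc i j h1 (by omega)] at hb1
      rw [pv_cell_eq bc (i+1) j hi1 (by omega)] at hb2
      simp [pvPairOK, hb1, hb2] at this
  · rintro ⟨hH, hV⟩
    constructor
    · intro row hrow
      obtain ⟨i, hi, rfl⟩ := List.mem_iff_getElem.mp hrow
      rw [pv_zip_all]
      intro k h1 h2
      simp only [List.length_tail] at h2
      rw [List.getElem_tail]
      by_contra hc
      simp only [pvPairOK, Bool.not_eq_true, Bool.not_eq_false', Bool.and_eq_true, beq_iff_eq] at hc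
      exact hH ⟨i, k, by rw [List.getD_eq_getElem _ _ hi]; omega,
        by rw [pv_cell_eq bc i k hi (by omega)]; exact hc.1,
        by rw [pv_cell_eq bc i (k+1) hi (by omega)]; exact hc.2⟩
    · intro k h1 h2
      simp only [List.length_tail] at h2
      rw [List.getElem_tail, pv_zip_all]
      intro j hj1 hj2
      by_contra hc
      simp only [pvPairOK, Bool.not_eq_true, Bool.not_eq_false', Bool.and_eq_true, beq_iff_eq] at hc
      exact hV ⟨k, j, by omega,
        by rw [List.getD_eq_getElem _ _ h1]; omega,
        by rw [List.getD_eq_getElem _ _ (show k+1 < bc.length by omega)]; omega,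
        by rw [pv_cell_eq bc k j h1 hj1]; exact hc.1,
        by rw [pv_cell_eq bc (k+1) j (by omega) hj2]; exact hc.2⟩

lemma pv_a_key (bc : List (List String)) :
    check_black_neigh bc = true ↔
      ∀ (k m : Nat), k < bc.length → m < (bc.getD k []).length →
        pvCell bc k m = "b" →
          (0 < k → pvCell bc (k-1) m ≠ "b") ∧
          (k + 1 < bc.length → pvCell bc (k+1) m ≠ "b") ∧
          (0 < m → pvCell bc k (m-1) ≠ "b") ∧
          (m + 1 < (bc.getD k []).length → pvCell bc k (m+1) ≠ "b") := by
  unfold check_black_neigh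
  simp only [List.all_eq_true, PySem.List.mem_pyRange_one]
  constructor
  · intro h k m hk hm hb
    simp only [pvCell] at hb
    have h1 := h (k:Int) ⟨by positivity, by exact_mod_cast hk⟩ (m:Int)
      ⟨by positivity, by rw [PySem.List.pyGetD_natCast]; exact_mod_cast hm⟩
    simp only [PySem.List.pyGetD_natCast] at h1
    rw [if_pos (by simpa using hb)] at h1
    simp only [Bool.and_eq_true] at h1
    obtain ⟨⟨⟨c1, c2⟩, c3⟩, c4⟩ := h1
    refine ⟨?_, ?_, ?_, ?_⟩
    · intro hk0
      rw [if_pos (by exact_mod_cast hk0), show (k:Int)-1 = ((k-1:Nat):Int) by omega,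
        PySem.List.pyGetD_natCast] at c1
      simpa [pvCell] using c1
    · intro hk1
      rw [if_pos (by omega), show (k:Int)+1 = ((k+1:Nat):Int) by omega,
        PySem.List.pyGetD_natCast] at c2
      simpa [pvCell] using c2
    · intro hm0
      rw [if_pos (by exact_mod_cast hm0), show (m:Int)-1 = ((m-1:Nat):Int) by omega] at c3
      rw [PySem.List.pyGetD_natCast] at c3
      simpa [pvCell] using c3
    · intro hm1
      rw [if_pos (by omega), show (m:Int)+1 = ((m+1:Nat):Int) by omega] at c4
      rw [PySem.List.pyGetD_natCast] at c4
      simpa [pvCell] using c4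
  · intro h x hx x1 hx1
    obtain ⟨hx0, hxn⟩ := hx
    obtain ⟨h10, h1n⟩ := hx1
    lift x to Nat using hx0 with k
    rw [PySem.List.pyGetD_natCast] at h1n
    lift x1 to Nat using h10 with m
    simp only [PySem.List.pyGetD_natCast]
    have hk : k < bc.length := by exact_mod_cast hxn
    have hm : m < (bc.getD k []).length := by exact_mod_cast h1n
    by_cases hb : (bc.getD k []).getD m "" = "b"
    · rw [if_pos (by simpa using hb)]
      obtain ⟨c1, c2, c3, c4⟩ := h k m hk hm (by simpa [pvCell] using hb)
      simp only [pvCell] at c1 c2 c3 c4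
      simp only [Bool.and_eq_true]
      refine ⟨⟨⟨?_, ?_⟩, ?_⟩, ?_⟩
      · split_ifs with hc
        · have hk0 : 0 < k := by exact_mod_cast hc
          rw [show (k:Int)-1 = ((k-1:Nat):Int) by omega, PySem.List.pyGetD_natCast]
          simpa using c1 hk0
        · rfl
      · split_ifs with hc
        · have hk1 : k + 1 < bc.length := by omega
          rw [show (k:Int)+1 = ((k+1:Nat):Int) by omega, PySem.List.pyGetD_natCast]
          simpa using c2 hk1
        · rfl
      · split_ifs with hc
        · have hm0 : 0 < m := by exact_mod_cast hc
          rw [show (m:Int)-1 = ((m-1:Nat):Int) by omega, PySem.List.pyGetD_natCast]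
          simpa using c3 hm0
        · rfl
      · split_ifs with hc
        · have hm1 : m + 1 < (bc.getD k []).length := by omega
          rw [show (m:Int)+1 = ((m+1:Nat):Int) by omega, PySem.List.pyGetD_natCast]
          simpa using c4 hm1
        · rfl
    · rw [if_neg (by simpa using hb)]

lemma pv_a_true_iff (bc : List (List String)) :
    check_black_neigh bc = true ↔ (¬ pvHP bc ∧ ¬ pvVP bc) := by
  rw [pv_a_key]
  constructor
  · intro h
    constructor
    · rintro ⟨i, j, hj, hb1, hb2⟩
      have hi : i < bc.length := by
        by_contra hc
        rw [List.getD_eq_default _ _ (Nat.le_of_not_lt hc)] at hj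
        simp at hj
      exact (h i j hi (by omega) hb1).2.2.2 hj hb2
    · rintro ⟨i, j, hi, hj1, hj2, hb1, hb2⟩
      exact (h i j (by omega) hj1 hb1).2.1 hi hb2
  · rintro ⟨hH, hV⟩ k m hk hm hb
    refine ⟨?_, ?_, ?_, ?_⟩
    · intro hk0 hcb
      have he : k - 1 + 1 = k := by omega
      have hmlt : m < (bc.getD (k-1) []).length := pv_getD_b_lt hcb
      exact hV ⟨k-1, m, by omega, hmlt, by rw [he]; exact hm, hcb, by rw [he]; exact hb⟩
    · intro hk1 hcb
      exact hV ⟨k, m, hk1, hm, pv_getD_b_lt hcb, hb, hcb⟩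
    · intro hm0 hcb
      have he : m - 1 + 1 = m := by omega
      exact hH ⟨k, m-1, by omega, hcb, by rw [he]; exact hb⟩
    · intro hm1 hcb
      exact hH ⟨k, m, hm1, hb, hcb⟩

-- ===== VERDICT (by name: the statement is the Claim_ definition above) =====
theorem check_black_neigh_spec : Claim_equal_check_black_neigh := by
  intro bc _ _
  unfold Spec_check_black_neigh
  have h1 := pv_a_true_iff bc
  have h2 := pv_alt_true_iff bc
  cases ha : check_black_neigh bc <;> cases hb : check_black_neigh_alt bc <;> simp_all
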